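-- pv_equiv track=rewrite | github.com/huntzhan/zhlint | zhlint/utils.py | count_offset
-- ===== SOURCE A (Python) =====
-- def count_offset(prefix):
--     offset = 0
--     for c in reversed(prefix):
--         if c == '\n':
--             break
--         else:
--             offset += 1
--     return offset
-- ===== SOURCE B (Python) =====
-- def count_offset(prefix):
--     return len(prefix.split('\n')[-1])
-- ===== Notes on version B (the rewrite author's own statement) =====
-- stated objective: idiomatic
-- what changed: Instead of counting characters backwards until a newline, B splits the string into its newline-separated segments and returns the length of the last segment (split always yields at least one segment, so [-1] is total).
import Mathlib
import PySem

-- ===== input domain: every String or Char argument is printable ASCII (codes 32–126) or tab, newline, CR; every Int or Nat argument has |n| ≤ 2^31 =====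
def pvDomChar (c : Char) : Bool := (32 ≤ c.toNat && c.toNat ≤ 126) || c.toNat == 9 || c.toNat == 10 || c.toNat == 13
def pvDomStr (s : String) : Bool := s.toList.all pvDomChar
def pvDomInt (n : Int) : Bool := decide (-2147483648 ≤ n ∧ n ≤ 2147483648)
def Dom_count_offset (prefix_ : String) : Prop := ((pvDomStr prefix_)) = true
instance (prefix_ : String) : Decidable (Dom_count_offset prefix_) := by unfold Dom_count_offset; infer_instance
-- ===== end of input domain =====

-- B replaces A's backward count-until-newline loop by splitting the string on '\n' and taking the length of the last segment (idiomatic; same cost).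

-- ===== PORT A =====
-- Loop over reversed(prefix): accumulate offset, break at the first '\n'.
def countOffsetLoop : Int → List Char → Int
  | offset, [] => offset
  | offset, c :: cs => if c = '\n' then offset else countOffsetLoop (offset + 1) cs

def count_offset (prefix_ : String) : Int :=
  countOffsetLoop 0 prefix_.toList.reverse

-- ===== PORT B =====
-- len(prefix.split('\n')[-1]): split on '\n' (PySem.Chars.splitOn, sep nonempty), take the
-- last segment ([-1]; split always returns a nonempty list, so getLastD's default is unreachable), measure it.
def count_offset_alt (prefix_ : String) : Int :=
  (((PySem.Chars.splitOn prefix_.toList ['\n']).getLastD []).length : Int)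

-- ===== PRECONDITION & SPEC =====
def Spec_count_offset (prefix_ : String) (out : Int) : Prop := out = count_offset_alt prefix_
instance (prefix_ : String) (out : Int) : Decidable (Spec_count_offset prefix_ out) := by unfold Spec_count_offset; infer_instance

-- ===== CLAIM (what is proved, stated in full; the proofs are below) =====
def Claim_equal_count_offset : Prop := ∀ (prefix_ : String), Dom_count_offset prefix_ → Spec_count_offset prefix_ (count_offset prefix_)

-- ===== LEMMAS AND PROOFS =====

-- forward reference count: characters after the last '\n', scanning left to right with a resetting counter
def tailLen : List Char → Nat → Nat
  | [], k => k
  | c :: rest, k => if c = '\n' then tailLen rest 0 else tailLen rest (k + 1)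

theorem tailLen_append (l1 l2 : List Char) (k : Nat) :
    tailLen (l1 ++ l2) k = tailLen l2 (tailLen l1 k) := by
  induction l1 generalizing k with
  | nil => rfl
  | cons c cs ih => by_cases h : c = '\n' <;> simp [tailLen, h, ih]

-- last segment produced by splitOn.go, with enough fuel
theorem go_last (d : List Char) (l : List Char) :
    ∀ (fuel : Nat) (cur : List Char) (acc : List (List Char)), l.length ≤ fuel →
      ((PySem.Chars.splitOn.go ['\n'] fuel l cur acc).getLastD d).length = tailLen l cur.length := by
  induction l with
  | nil =>
    intro fuel cur acc _
    cases fuel <;> simp [PySem.Chars.splitOn.go, tailLen]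
  | cons c rest ih =>
    intro fuel cur acc hf
    cases fuel with
    | zero => simp at hf
    | succ f =>
      have hf' : rest.length ≤ f := by simpa using hf
      by_cases h : c = '\n'
      · subst h
        simpa [PySem.Chars.splitOn.go, List.isPrefixOf, tailLen] using ih f [] (cur.reverse :: acc) hf'
      · have hb : ('\n' == c) = false := by simp [Ne.symm h]
        simpa [PySem.Chars.splitOn.go, List.isPrefixOf, hb, tailLen, h] using ih f (c :: cur) acc hf'

-- the loop's accumulator shifts out
theorem countOffsetLoop_shift (rev : List Char) (off : Int) :
    countOffsetLoop off rev = off + countOffsetLoop 0 rev := by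
  induction rev generalizing off with
  | nil => simp [countOffsetLoop]
  | cons c cs ih =>
    by_cases h : c = '\n' <;> simp [countOffsetLoop, h]
    rw [ih (off + 1), ih 1]; ring

-- A's backward loop computes the forward resetting count
theorem loop_eq_tailLen (l : List Char) :
    countOffsetLoop 0 l.reverse = (tailLen l 0 : Int) := by
  induction l using List.reverseRecOn with
  | nil => rfl
  | append_singleton l' c ih =>
    rw [tailLen_append]
    by_cases h : c = '\n'
    · subst h
      simp [countOffsetLoop, tailLen]
    · simp only [List.reverse_append, List.reverse_singleton, List.singleton_append,
        countOffsetLoop, if_neg h, tailLen]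
      rw [countOffsetLoop_shift, ih]
      push_cast; ring

-- ===== VERDICT (by name: the statement is the Claim_ definition above) =====
theorem count_offset_spec : Claim_equal_count_offset := by
  intro prefix_ _
  unfold Spec_count_offset count_offset count_offset_alt
  rw [loop_eq_tailLen, PySem.Chars.splitOn,
    go_last [] prefix_.toList (prefix_.toList.length + 1) [] [] (by omega)]
  rfl
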